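-- pv_equiv track=rewrite | github.com/catalinc/advent-of-code-2017 | day_17.py | spin_lock
-- ===== SOURCE A (Python) =====
-- def spin_lock(steps, times):
--     data = [0]
--     i, j = 1, 0
--     while i <= times:
--         j = (j + 1 + steps) % len(data)
--         data.insert(j, i)
--         i += 1
--     j = (j + 1) % len(data)
--     return data[j]
-- ===== SOURCE B (Python) =====
-- def spin_lock(steps, times):
--     # Record only the insertion positions (O(n)), then trace the target index
--     # backwards through the insertions instead of materialising the buffer.
--     pos = []
--     j = 0
--     for i in range(1, times + 1):
--         j = (j + 1 + steps) % i
--         pos.append(j)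
--     q = (j + 1) % (len(pos) + 1)
--     i = len(pos)
--     for p in reversed(pos):
--         if p == q:
--             return i
--         if p < q:
--             q -= 1
--         i -= 1
--     return 0
-- ===== Notes on version B (the rewrite author's own statement) =====
-- stated objective: faster
-- what changed: B never builds the circular buffer: it records only the insertion position of each value in one O(n) forward pass, then traces the final target index backwards through the recorded insertions to find which value ends up there, replacing A's O(n^2) list.insert simulation.
import Mathlib
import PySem

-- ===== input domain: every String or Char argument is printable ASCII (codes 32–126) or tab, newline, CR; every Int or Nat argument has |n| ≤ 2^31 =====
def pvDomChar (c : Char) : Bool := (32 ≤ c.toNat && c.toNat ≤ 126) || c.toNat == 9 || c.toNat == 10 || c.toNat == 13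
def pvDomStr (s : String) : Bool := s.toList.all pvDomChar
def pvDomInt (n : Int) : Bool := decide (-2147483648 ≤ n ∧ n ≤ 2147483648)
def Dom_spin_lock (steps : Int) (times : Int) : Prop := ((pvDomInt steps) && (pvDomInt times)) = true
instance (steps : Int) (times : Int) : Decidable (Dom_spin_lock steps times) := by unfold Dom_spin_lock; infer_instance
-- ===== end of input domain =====

-- B replaces A's O(times^2) list.insert simulation by an O(times) record of insertion
-- positions plus a backward trace of the target index (objective: faster).

-- ===== PORT A =====
def spin_lock (steps : Int) (times : Int) : Int :=
  let st := (PySem.List.pyRange 1 (times + 1) 1).foldl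
    (fun (s : List Int × Int) (i : Int) =>
      let j := PySem.Int.mod (s.2 + 1 + steps) ((s.1.length : Nat) : Int)
      (PySem.List.insert s.1 j i, j)) ([0], 0)
  let j := PySem.Int.mod (st.2 + 1) ((st.1.length : Nat) : Int)
  (PySem.List.pyGet? st.1 j).getD 0

-- ===== PORT B =====
-- backward trace: walk the recorded positions from last insertion to first
def spinScan : List Int → Int → Int → Int
  | [], _, _ => 0
  | p :: rest, i, q =>
    if p = q then i else spinScan rest (i - 1) (if p < q then q - 1 else q)

def spin_lock_alt (steps : Int) (times : Int) : Int :=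
  let st := (PySem.List.pyRange 1 (times + 1) 1).foldl
    (fun (s : List Int × Int) (i : Int) =>
      let j := PySem.Int.mod (s.2 + 1 + steps) i
      (s.1 ++ [j], j)) ([], 0)
  let q := PySem.Int.mod (st.2 + 1) (((st.1.length : Nat) : Int) + 1)
  spinScan st.1.reverse ((st.1.length : Nat) : Int) q

-- ===== PRECONDITION & SPEC =====
def Spec_spin_lock (steps : Int) (times : Int) (out : Int) : Prop := out = spin_lock_alt steps times
instance (steps : Int) (times : Int) (out : Int) : Decidable (Spec_spin_lock steps times out) := by unfold Spec_spin_lock; infer_instance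

-- ===== CLAIM (what is proved, stated in full; the proofs are below) =====
def Claim_equal_spin_lock : Prop := ∀ (steps : Int) (times : Int), Dom_spin_lock steps times → Spec_spin_lock steps times (spin_lock steps times)

-- ===== LEMMAS AND PROOFS =====

-- A's loop state after n iterations
def stA (steps : Int) : Nat → List Int × Int
  | 0 => ([0], 0)
  | k + 1 =>
    let s := stA steps k
    let j := PySem.Int.mod (s.2 + 1 + steps) ((s.1.length : Nat) : Int)
    (PySem.List.insert s.1 j ((k : Int) + 1), j)

-- B's loop state after n iterations
def stB (steps : Int) : Nat → List Int × Int
  | 0 => ([], 0)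
  | k + 1 =>
    let s := stB steps k
    let j := PySem.Int.mod (s.2 + 1 + steps) ((k : Int) + 1)
    (s.1 ++ [j], j)

lemma lenA (steps : Int) (k : Nat) : (stA steps k).1.length = k + 1 := by
  induction k with
  | zero => rfl
  | succ k ih => simp [stA, PySem.List.length_insert, ih]

lemma lenB (steps : Int) (k : Nat) : (stB steps k).1.length = k := by
  induction k with
  | zero => rfl
  | succ k ih => simp [stB, ih]

lemma jEq (steps : Int) (k : Nat) : (stB steps k).2 = (stA steps k).2 := by
  induction k with
  | zero => rfl
  | succ k ih => simp [stA, stB, lenA, ih]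

lemma foldA (steps times : Int) :
    ((PySem.List.pyRange 1 (times + 1) 1).foldl
      (fun (s : List Int × Int) (i : Int) =>
        let j := PySem.Int.mod (s.2 + 1 + steps) ((s.1.length : Nat) : Int)
        (PySem.List.insert s.1 j i, j)) ([0], 0)) = stA steps times.toNat := by
  rw [PySem.List.pyRange_one]
  have h : times + 1 - 1 = times := by ring
  rw [h]
  induction times.toNat with
  | zero => rfl
  | succ n ih =>
    rw [List.range_succ, List.map_append, List.foldl_append, ih]
    have hc : (1 : Int) + (n : Int) = (n : Int) + 1 := by ring
    simp only [List.map_cons, List.map_nil, List.foldl_cons, List.foldl_nil, hc, stA]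

lemma foldB (steps times : Int) :
    ((PySem.List.pyRange 1 (times + 1) 1).foldl
      (fun (s : List Int × Int) (i : Int) =>
        let j := PySem.Int.mod (s.2 + 1 + steps) i
        (s.1 ++ [j], j)) ([], 0)) = stB steps times.toNat := by
  rw [PySem.List.pyRange_one]
  have h : times + 1 - 1 = times := by ring
  rw [h]
  induction times.toNat with
  | zero => rfl
  | succ n ih =>
    rw [List.range_succ, List.map_append, List.foldl_append, ih]
    have hc : (1 : Int) + (n : Int) = (n : Int) + 1 := by ring
    simp only [List.map_cons, List.map_nil, List.foldl_cons, List.foldl_nil, hc, stB]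

lemma insert_getElem? {α : Type} (xs : List α) (p : Nat) (hp : p ≤ xs.length) (v : α) (q : Nat) :
    (xs.take p ++ v :: xs.drop p)[q]? =
      if q < p then xs[q]? else if q = p then some v else xs[q - 1]? := by
  have hl : (xs.take p).length = p := by simp [hp]
  by_cases h1 : q < p
  · rw [List.getElem?_append_left (by omega), List.getElem?_take_of_lt h1, if_pos h1]
  · rw [List.getElem?_append_right (by omega), hl, if_neg h1]
    by_cases h2 : q = p
    · subst h2; simp
    · rw [if_neg h2]
      have hq : q - p = (q - p - 1) + 1 := by omega
      rw [hq, List.getElem?_cons_succ, List.getElem?_drop]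
      congr 1
      omega

-- core invariant: indexing A's buffer = B's backward trace over the positions
lemma core (steps : Int) (k : Nat) (q : Int) (h0 : 0 ≤ q) (h1 : q < (k : Int) + 1) :
    PySem.List.pyGet? (stA steps k).1 q = some (spinScan (stB steps k).1.reverse (k : Int) q) := by
  induction k generalizing q with
  | zero =>
    have hq : q = 0 := by omega
    subst hq; rfl
  | succ k ih =>
    have hpos : (0 : Int) < (k : Int) + 1 := by positivity
    have hjnn := PySem.Int.mod_nonneg ((stA steps k).2 + 1 + steps) hpos
    have hjlt := PySem.Int.mod_lt ((stA steps k).2 + 1 + steps) hpos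
    set j := PySem.Int.mod ((stA steps k).2 + 1 + steps) ((k : Int) + 1) with hjdef
    have hlenc : (((stA steps k).1.length : Nat) : Int) = (k : Int) + 1 := by
      rw [lenA]; push_cast; ring
    have hA1 : (stA steps (k + 1)).1 =
        PySem.List.insert (stA steps k).1 j (((k : Nat) : Int) + 1) := by
      simp only [stA, hlenc]; rw [← hjdef]
    have hB1 : (stB steps (k + 1)).1 = (stB steps k).1 ++ [j] := by
      simp only [stB, jEq]; rw [← hjdef]
    have hjn : j = ((j.toNat : Nat) : Int) := (Int.toNat_of_nonneg hjnn).symm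
    have hple : j.toNat ≤ (stA steps k).1.length := by
      rw [lenA]; omega
    rw [hA1, hB1, hjn, PySem.List.insert_natCast _ _ _ hple]
    rw [List.reverse_append, List.reverse_singleton, List.singleton_append]
    have hscan : spinScan (((j.toNat : Nat) : Int) :: (stB steps k).1.reverse)
        (((k : Nat) : Int) + 1) q =
        if ((j.toNat : Nat) : Int) = q then ((k : Nat) : Int) + 1
        else spinScan (stB steps k).1.reverse ((k : Nat) : Int)
          (if ((j.toNat : Nat) : Int) < q then q - 1 else q) := by
      simp only [spinScan, add_sub_cancel_right]
    push_cast
    rw [hscan, PySem.List.pyGet?_of_nonneg _ h0,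
      insert_getElem? _ _ hple _ q.toNat]
    by_cases hqp : ((j.toNat : Nat) : Int) = q
    · have h1' : ¬ q.toNat < j.toNat := by omega
      have h2' : q.toNat = j.toNat := by omega
      rw [if_neg h1', if_pos h2', if_pos hqp]
    · rw [if_neg hqp]
      by_cases hlt : ((j.toNat : Nat) : Int) < q
      · -- q > j : element was at q - 1 before the insertion
        have h1' : ¬ q.toNat < j.toNat := by omega
        have h2' : ¬ q.toNat = j.toNat := by omega
        rw [if_neg h1', if_neg h2', if_pos hlt]
        have hq1 : q.toNat - 1 = (q - 1).toNat := by omega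
        rw [hq1, ← PySem.List.pyGet?_of_nonneg _ (by omega : (0:Int) ≤ q - 1)]
        exact ih (q - 1) (by omega) (by push_cast at h1 ⊢; omega)
      · -- q < j : element was already at q
        have h1' : q.toNat < j.toNat := by omega
        rw [if_pos h1', if_neg hlt,
          ← PySem.List.pyGet?_of_nonneg _ h0]
        exact ih q h0 (by omega)

theorem spin_lock_spec : Claim_equal_spin_lock := by
  intro steps times _
  unfold Spec_spin_lock spin_lock spin_lock_alt
  rw [foldA, foldB]
  set n := times.toNat with hn
  have hlA : (((stA steps n).1.length : Nat) : Int) = (n : Int) + 1 := by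
    rw [lenA]; push_cast; ring
  have hlB : (((stB steps n).1.length : Nat) : Int) = (n : Int) := by
    rw [lenB]
  have hpos : (0 : Int) < (n : Int) + 1 := by positivity
  have hq0 := PySem.Int.mod_nonneg ((stA steps n).2 + 1) hpos
  have hq1 := PySem.Int.mod_lt ((stA steps n).2 + 1) hpos
  simp only [hlA, hlB, jEq]
  rw [core steps n _ hq0 hq1]
  rfl
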